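-- pv_equiv track=rewrite | github.com/rohrersimon/CS50p | Problem Set 5/test_plates/plates.py | zero_start
-- ===== SOURCE A (Python) =====
-- def zero_start(word):
--     list = []
--
--     for i in word:
--         if i.isdecimal():
--             list.append(int(i))
--
--     if list == []:
--         return False
--
--     if list[0] == 0:
--         return True
--     else:
--         return False
-- ===== SOURCE B (Python) =====
-- def zero_start(word):
--     first = next((c for c in word if c.isdecimal()), None)
--     return first is not None and int(first) == 0
-- ===== Notes on version B (the rewrite author's own statement) =====
-- stated objective: simpler
-- what changed: B stops at the first decimal character (generator + next with a None sentinel) instead of building the full list of digit values and inspecting its head.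
import Mathlib
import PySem

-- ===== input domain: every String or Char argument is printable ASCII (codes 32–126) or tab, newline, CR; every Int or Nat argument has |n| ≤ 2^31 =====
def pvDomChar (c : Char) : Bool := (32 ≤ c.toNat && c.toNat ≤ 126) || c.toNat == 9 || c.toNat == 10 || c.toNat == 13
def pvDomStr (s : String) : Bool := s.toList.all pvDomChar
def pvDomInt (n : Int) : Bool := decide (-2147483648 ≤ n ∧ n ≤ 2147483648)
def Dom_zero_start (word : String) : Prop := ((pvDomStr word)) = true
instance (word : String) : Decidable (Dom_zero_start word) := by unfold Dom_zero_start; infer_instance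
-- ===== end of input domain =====

-- B stops at the first decimal character (Option sentinel) instead of collecting every digit value; objective: simpler.


-- ===== PORT A =====
-- On the printable-ASCII domain, str.isdecimal coincides with PySem.Chars.isdigit ('0'-'9'),
-- and int(i) for such a one-digit string is i.toNat - 48 (exact on this domain).
def zero_start (word : String) : Bool :=
  let lst : List Int :=
    word.toList.foldl (fun acc i => if PySem.Chars.isdigit i then acc ++ [((i.toNat : Int) - 48)] else acc) []
  match lst with
  | [] => false
  | x :: _ => if x = 0 then true else false

-- ===== PORT B =====
def zero_start_alt (word : String) : Bool :=
  match word.toList.find? (fun c => PySem.Chars.isdigit c) with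
  | none => false
  | some c => ((c.toNat : Int) - 48) == 0

-- ===== PRECONDITION & SPEC =====
def Spec_zero_start (word : String) (out : Bool) : Prop := out = zero_start_alt word
instance (word : String) (out : Bool) : Decidable (Spec_zero_start word out) := by unfold Spec_zero_start; infer_instance

-- ===== CLAIM (what is proved, stated in full; the proofs are below) =====
def Claim_equal_zero_start : Prop := ∀ (word : String), Dom_zero_start word → Spec_zero_start word (zero_start word)

-- ===== LEMMAS AND PROOFS =====
theorem zero_start_eq_alt (word : String) : zero_start word = zero_start_alt word := by
  unfold zero_start zero_start_alt
  rw [PySem.List.foldl_append_if]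
  simp only [List.nil_append]
  induction word.toList with
  | nil => rfl
  | cons c l ih =>
    by_cases h : PySem.Chars.isdigit c = true
    · simp [List.find?, h]
      by_cases hz : ((c.toNat : Int) - 48 = 0) <;> simp [hz]
    · simp only [List.filter_cons, List.find?, h, Bool.false_eq_true, if_false] at *
      exact ih

-- ===== VERDICT (by name: the statement is the Claim_ definition above) =====
theorem zero_start_spec : Claim_equal_zero_start := by
  intro word _
  exact zero_start_eq_alt word
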